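-- pv_equiv track=rewrite | github.com/hari-599/email_rag | Services/preprocessor/email_cleaning.py | _remove_newsletter_noise
-- ===== SOURCE A (Python) =====
-- def _remove_newsletter_noise(text):
--     lines = []
--     skip_prefixes = (
--         "welcome new hires",
--         "transfers to",
--         "nuggets & notes",
--         "in the news",
--         "enrononline statistics",
--     )
--
--     for line in text.splitlines():
--         stripped = line.strip()
--         lowered = stripped.lower()
--         if not stripped:
--             lines.append("")
--             continue
--         if any(lowered.startswith(prefix) for prefix in skip_prefixes):
--             break
--         if lowered.startswith("http://") or lowered.startswith("https://"):
--             continue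
--         if lowered.startswith("[no worries"):
--             continue
--         lines.append(line)
--
--     return "\n".join(lines).strip()
-- ===== SOURCE B (Python) =====
-- def _remove_newsletter_noise(text):
--     skip_prefixes = (
--         "welcome new hires",
--         "transfers to",
--         "nuggets & notes",
--         "in the news",
--         "enrononline statistics",
--     )
--     all_lines = text.splitlines()
--     cutoff = next(
--         (i for i, ln in enumerate(all_lines)
--          if ln.strip().lower().startswith(skip_prefixes)),
--         len(all_lines),
--     )
--     kept = []
--     for line in all_lines[:cutoff]:
--         s = line.strip()
--         if not s:
--             kept.append("")
--         elif s.lower().startswith(("http://", "https://", "[no worries")):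
--             continue
--         else:
--             kept.append(line)
--     return "\n".join(kept).strip()
-- ===== Notes on version B (the rewrite author's own statement) =====
-- stated objective: alternative
-- what changed: Replaces A's single fused loop-with-break by two passes: first find the cutoff index of the first skip-prefix line with next() over enumerate, then filter only lines[:cutoff] into the kept list.
import Mathlib
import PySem

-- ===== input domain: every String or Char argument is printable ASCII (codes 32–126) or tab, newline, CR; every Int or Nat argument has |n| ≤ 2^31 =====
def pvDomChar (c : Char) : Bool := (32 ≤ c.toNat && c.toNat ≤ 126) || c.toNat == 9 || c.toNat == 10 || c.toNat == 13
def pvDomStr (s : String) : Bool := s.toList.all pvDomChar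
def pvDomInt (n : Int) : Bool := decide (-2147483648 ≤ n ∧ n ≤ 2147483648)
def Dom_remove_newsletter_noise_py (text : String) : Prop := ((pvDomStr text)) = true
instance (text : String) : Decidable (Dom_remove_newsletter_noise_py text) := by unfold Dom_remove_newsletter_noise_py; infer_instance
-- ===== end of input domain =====

-- B finds the cutoff index first, then filters only the lines before it (alternative decomposition; same cost).

-- ===== PORT A =====
def pvSkipPrefixes : List String :=
  ["welcome new hires", "transfers to", "nuggets & notes", "in the news", "enrononline statistics"]

-- A's fused loop: accumulate kept lines, break on a skip-prefix line
def pvLoopA (acc : List String) : List String → List String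
  | [] => acc
  | line :: rest =>
    let stripped := PySem.Str.strip line
    let lowered := PySem.Str.lower stripped
    if stripped = "" then pvLoopA (acc ++ [""]) rest
    else if pvSkipPrefixes.any (fun p => PySem.Str.startswith lowered p) then acc
    else if PySem.Str.startswith lowered "http://" || PySem.Str.startswith lowered "https://" then
      pvLoopA acc rest
    else if PySem.Str.startswith lowered "[no worries" then pvLoopA acc rest
    else pvLoopA (acc ++ [line]) rest

def remove_newsletter_noise_py (text : String) : String :=
  PySem.Str.strip (PySem.Str.join "\n" (pvLoopA [] (PySem.Str.splitlines text)))

-- ===== PORT B =====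
-- B: does this line start with one of the skip prefixes?
def pvIsSkip (line : String) : Bool :=
  pvSkipPrefixes.any (fun p => PySem.Str.startswith (PySem.Str.lower (PySem.Str.strip line)) p)

-- B: per-line filter applied before the cutoff
def pvKeep (line : String) : Option String :=
  let s := PySem.Str.strip line
  if s = "" then some ""
  else if ["http://", "https://", "[no worries"].any
      (fun p => PySem.Str.startswith (PySem.Str.lower s) p) then none
  else some line

def remove_newsletter_noise_py_alt (text : String) : String :=
  let allLines := PySem.Str.splitlines text
  let cutoff := (allLines.findIdx? pvIsSkip).getD allLines.length
  PySem.Str.strip (PySem.Str.join "\n" ((allLines.take cutoff).filterMap pvKeep))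

-- ===== PRECONDITION & SPEC =====
def Spec_remove_newsletter_noise_py (text : String) (out : String) : Prop := out = remove_newsletter_noise_py_alt text
instance (text : String) (out : String) : Decidable (Spec_remove_newsletter_noise_py text out) := by unfold Spec_remove_newsletter_noise_py; infer_instance

-- ===== CLAIM (what is proved, stated in full; the proofs are below) =====
def Claim_equal_remove_newsletter_noise_py : Prop := ∀ (text : String), Dom_remove_newsletter_noise_py text → Spec_remove_newsletter_noise_py text (remove_newsletter_noise_py text)

-- ===== LEMMAS AND PROOFS =====

theorem pvIsSkip_of_strip_empty (line : String) (h : PySem.Str.strip line = "") :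
    pvIsSkip line = false := by
  simp [pvIsSkip, h]
  decide

theorem pvLoopA_eq (lines acc : List String) :
    pvLoopA acc lines =
      acc ++ (lines.take ((lines.findIdx? pvIsSkip).getD lines.length)).filterMap pvKeep := by
  induction lines generalizing acc with
  | nil => simp [pvLoopA]
  | cons line rest ih =>
    by_cases hskip : pvIsSkip line = true
    · -- A breaks here; B's cutoff is 0 relative to this suffix
      have hne : ¬ PySem.Str.strip line = "" := by
        intro h
        rw [pvIsSkip_of_strip_empty line h] at hskip
        exact Bool.false_ne_true hskip
      have hcut0 : ((line :: rest).findIdx? pvIsSkip).getD (line :: rest).length = 0 := by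
        rw [List.findIdx?_cons, if_pos hskip]; rfl
      rw [hcut0]
      have hskip' : (pvSkipPrefixes.any
          (fun p => PySem.Str.startswith (PySem.Str.lower (PySem.Str.strip line)) p)) = true := hskip
      simp only [pvLoopA, if_neg hne, if_pos hskip', List.take_zero, List.filterMap_nil,
        List.append_nil]
    · have hskipf : pvIsSkip line = false := by
        cases h : pvIsSkip line
        · rfl
        · exact absurd h hskip
      have hcut : ((line :: rest).findIdx? pvIsSkip).getD (line :: rest).length
          = ((rest.findIdx? pvIsSkip).getD rest.length) + 1 := by
        rw [List.findIdx?_cons, if_neg (by rw [hskipf]; exact Bool.false_ne_true)]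
        cases h : rest.findIdx? pvIsSkip <;> simp
      rw [hcut, List.take_succ_cons, List.filterMap_cons]
      have hpreff : (pvSkipPrefixes.any
          (fun p => PySem.Str.startswith (PySem.Str.lower (PySem.Str.strip line)) p)) = false := hskipf
      have hprefne : ¬ (pvSkipPrefixes.any
          (fun p => PySem.Str.startswith (PySem.Str.lower (PySem.Str.strip line)) p)) = true := by
        rw [hpreff]; exact Bool.false_ne_true
      by_cases hempty : PySem.Str.strip line = ""
      · have hkeep : pvKeep line = some "" := by
          simp only [pvKeep]; rw [if_pos hempty]
        simp only [pvLoopA, if_pos hempty, hkeep, ih, List.append_assoc,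
          List.singleton_append]
      · simp only [pvLoopA, if_neg hempty, if_neg hprefne]
        set b1 := PySem.Str.startswith (PySem.Str.lower (PySem.Str.strip line)) "http://" with hb1
        set b2 := PySem.Str.startswith (PySem.Str.lower (PySem.Str.strip line)) "https://" with hb2
        set b3 := PySem.Str.startswith (PySem.Str.lower (PySem.Str.strip line)) "[no worries" with hb3
        have hany : (["http://", "https://", "[no worries"].any
            (fun p => PySem.Str.startswith (PySem.Str.lower (PySem.Str.strip line)) p))
            = (b1 || (b2 || b3)) := by
          simp only [List.any_cons, List.any_nil, Bool.or_false, hb1, hb2, hb3]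
        by_cases hurl : (b1 || b2) = true
        · have hkeep : pvKeep line = none := by
            simp only [pvKeep, hany]
            rw [if_neg hempty, if_pos]
            rcases Bool.or_eq_true_iff.mp hurl with h | h <;>
              simp only [h, Bool.true_or, Bool.or_true]
          rw [if_pos hurl, hkeep, ih]
        · have hurlf : (b1 || b2) = false := by
            cases h : (b1 || b2)
            · rfl
            · exact absurd h hurl
          obtain ⟨h1, h2⟩ := Bool.or_eq_false_iff.mp hurlf
          rw [if_neg hurl]
          by_cases hnw : b3 = true
          · have hkeep : pvKeep line = none := by
              simp only [pvKeep, hany]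
              rw [if_neg hempty, if_pos (by simp only [hnw, Bool.or_true])]
            rw [if_pos hnw, hkeep, ih]
          · have hnwf : b3 = false := by
              cases h : b3
              · rfl
              · exact absurd h hnw
            have hkeep : pvKeep line = some line := by
              simp only [pvKeep, hany]
              rw [if_neg hempty,
                if_neg (by simp only [h1, h2, hnwf, Bool.or_false]; exact Bool.false_ne_true)]
            rw [if_neg hnw, hkeep, ih]
            simp

-- ===== VERDICT (by name: the statement is the Claim_ definition above) =====
theorem remove_newsletter_noise_py_spec : Claim_equal_remove_newsletter_noise_py := by
  intro text _
  unfold Spec_remove_newsletter_noise_py remove_newsletter_noise_py remove_newsletter_noise_py_alt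
  rw [pvLoopA_eq]
  rfl
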